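-- pv_equiv track=rewrite | github.com/sometimeslove/suanfa | 动态规划/1.递推类型/2.母牛生小牛.py | CountCows
-- ===== SOURCE A (Python) =====
-- def CountCows(n):
--     if n==1:
--         return 1
--     if n==2:
--         return 2
--     if n==3:
--         return 3
--     return CountCows(n-1)+CountCows(n-3)
-- ===== SOURCE B (Python) =====
-- def CountCows(n):
--     if n <= 3:
--         return n
--     a, b, c = 1, 2, 3
--     for _ in range(n - 3):
--         a, b, c = b, c, c + a
--     return c
-- ===== Notes on version B (the rewrite author's own statement) =====
-- stated objective: faster
-- what changed: Replaced the naive exponential recursion with a bottom-up three-register iteration keeping only the last three values of the recurrence; intended as asymptotically faster (a timing run saw A time out at n=16 while B returned in under a millisecond, but could not confirm the label on enough inputs).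
-- outside the precondition, e.g. on CountCows(0): A raises RecursionError, B returns 0
import Mathlib
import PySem

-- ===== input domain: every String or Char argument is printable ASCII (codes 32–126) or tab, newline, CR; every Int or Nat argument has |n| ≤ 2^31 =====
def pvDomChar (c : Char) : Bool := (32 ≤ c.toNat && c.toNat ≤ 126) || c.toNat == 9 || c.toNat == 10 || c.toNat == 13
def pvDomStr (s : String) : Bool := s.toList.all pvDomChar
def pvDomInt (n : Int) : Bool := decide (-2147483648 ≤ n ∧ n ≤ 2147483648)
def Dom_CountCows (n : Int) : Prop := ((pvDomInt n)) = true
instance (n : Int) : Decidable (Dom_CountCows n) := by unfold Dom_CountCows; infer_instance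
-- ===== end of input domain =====

-- B replaces A's exponential recursion by a bottom-up three-register iteration; intended as faster
-- (a timing run measured A timing out at n=16 where B returned, without enough inputs to confirm the label).

-- ===== PORT A =====
-- A's recursion f(n)=f(n-1)+f(n-3) with base cases 1,2,3, transcribed as structural
-- recursion on the Nat value of n (for n ≥ 1, i.e. inside Pre_, n.toNat is exact).
def countCowsAux : Nat → Int
  | 0 => 0
  | 1 => 1
  | 2 => 2
  | 3 => 3
  | (n + 4) => countCowsAux (n + 3) + countCowsAux (n + 1)

def CountCows (n : Int) : Int := countCowsAux n.toNat

-- ===== PORT B =====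
def CountCows_alt (n : Int) : Int :=
  if n ≤ 3 then n
  else ((PySem.List.pyRange 0 (n - 3) 1).foldl
          (fun (t : Int × Int × Int) _ => (t.2.1, t.2.2, t.2.2 + t.1)) (1, 2, 3)).2.2

-- ===== PRECONDITION & SPEC =====
-- Pre_ excludes n ≤ 0, where Python A recurses forever (RecursionError): it never returns there.
def Pre_CountCows (n : Int) : Prop := 1 ≤ n
instance (n : Int) : Decidable (Pre_CountCows n) := by unfold Pre_CountCows; infer_instance
def pvWitness_CountCows : Int := (5)

def Spec_CountCows (n : Int) (out : Int) : Prop := out = CountCows_alt n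
instance (n : Int) (out : Int) : Decidable (Spec_CountCows n out) := by unfold Spec_CountCows; infer_instance

-- ===== CLAIM (what is proved, stated in full; the proofs are below) =====
def Claim_equal_CountCows : Prop := ∀ (n : Int), Dom_CountCows n → Pre_CountCows n → Spec_CountCows n (CountCows n)

-- ===== LEMMAS AND PROOFS =====

-- a fold that ignores the list elements is function iteration
theorem foldl_ignore_eq_iterate {α β : Type} (f : α → α) (l : List β) (init : α) :
    l.foldl (fun s _ => f s) init = f^[l.length] init := by
  induction l generalizing init with
  | nil => rfl
  | cons x xs ih => simp [List.foldl, ih, Function.iterate_succ_apply]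

-- invariant: after k iterations the registers hold f(k+1), f(k+2), f(k+3)
theorem iterate_step (k : Nat) :
    (fun (t : Int × Int × Int) => (t.2.1, t.2.2, t.2.2 + t.1))^[k] ((1, 2, 3) : Int × Int × Int)
      = (countCowsAux (k + 1), countCowsAux (k + 2), countCowsAux (k + 3)) := by
  induction k with
  | zero => rfl
  | succ k ih =>
      rw [Function.iterate_succ_apply', ih]
      show (countCowsAux (k + 2), countCowsAux (k + 3), countCowsAux (k + 3) + countCowsAux (k + 1))
        = (countCowsAux (k + 2), countCowsAux (k + 3), countCowsAux (k + 4))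
      rw [show countCowsAux (k + 4) = countCowsAux (k + 3) + countCowsAux (k + 1) from rfl]

-- ===== VERDICT (by name: the statement is the Claim_ definition above) =====
theorem CountCows_spec : Claim_equal_CountCows := by
  intro n _ hpre
  unfold Spec_CountCows CountCows CountCows_alt
  by_cases h3 : n ≤ 3
  · have : n = 1 ∨ n = 2 ∨ n = 3 := by unfold Pre_CountCows at hpre; omega
    rcases this with h | h | h <;> subst h <;> simp [h3, countCowsAux]
  · rw [if_neg h3, foldl_ignore_eq_iterate, PySem.List.length_pyRange_one, iterate_step]
    congr 1
    omega
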